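-- pv_equiv track=rewrite | github.com/abhidhakal/DSACoursework | ques5b.py | longest_hike
-- ===== SOURCE A (Python) =====
-- def longest_hike(nums, k):
--     if not nums:
--         return 0
--
--     left = right = 0
--     max_length = 1
--     current_gain = 0
--
--     while right < len(nums) - 1:
--         right += 1
--
--         # Calculate gain
--         if nums[right] > nums[right-1]:
--             current_gain += nums[right] - nums[right-1]
--
--         # Adjust left pointer if gain exceeds k
--         while current_gain > k and left < right:
--             if nums[left+1] > nums[left]:
--                 current_gain -= nums[left+1] - nums[left]
--             left += 1
--
--         max_length = max(max_length, right - left + 1)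
--
--     return max_length
-- ===== SOURCE B (Python) =====
-- def longest_hike(nums, k):
--     n = len(nums)
--     if n == 0:
--         return 0
--     # prefix table of accumulated uphill gain: pre[i] = gain of nums[0..i]
--     pre = [0]
--     for i in range(1, n):
--         pre.append(pre[-1] + max(0, nums[i] - nums[i-1]))
--     best = 1
--     for r in range(n):
--         # binary search (pre is non-decreasing) for the leftmost window start l
--         # with gain pre[r] - pre[l] <= k
--         lo, hi = 0, r + 1
--         while lo < hi:
--             mid = (lo + hi) // 2
--             if pre[r] - pre[mid] <= k:
--                 hi = mid
--             else:
--                 lo = mid + 1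
--         if lo <= r:
--             best = max(best, r - lo + 1)
--     return best
-- ===== Notes on version B (the rewrite author's own statement) =====
-- stated objective: alternative
-- what changed: Replaced A's two-pointer sliding window carrying a running gain by a precomputed non-decreasing prefix-gain table with, for each right endpoint, a binary search for the leftmost window start whose uphill gain fits in k.
import Mathlib
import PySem

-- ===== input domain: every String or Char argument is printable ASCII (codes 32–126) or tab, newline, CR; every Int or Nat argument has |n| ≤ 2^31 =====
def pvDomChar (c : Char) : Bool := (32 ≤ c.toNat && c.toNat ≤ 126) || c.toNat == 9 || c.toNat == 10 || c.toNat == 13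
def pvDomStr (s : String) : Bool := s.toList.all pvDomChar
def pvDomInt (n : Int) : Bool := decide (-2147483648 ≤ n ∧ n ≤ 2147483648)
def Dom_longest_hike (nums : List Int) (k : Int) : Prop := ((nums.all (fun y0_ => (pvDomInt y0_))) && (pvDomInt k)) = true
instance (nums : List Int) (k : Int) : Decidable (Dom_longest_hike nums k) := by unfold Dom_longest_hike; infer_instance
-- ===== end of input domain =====

-- B replaces A's two-pointer sliding window by a prefix-gain table with, for each right
-- endpoint, a scan for the first feasible left start (objective: alternative algorithm).

-- ===== PORT A =====
-- inner `while current_gain > k and left < right` loop of A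
def pvInnerA (nums : List Int) (k : Int) (left right : Nat) (gain : Int) : Nat × Int :=
  if gain > k ∧ left < right then
    pvInnerA nums k (left + 1) right
      (if nums.getD (left + 1) 0 > nums.getD left 0 then
        gain - (nums.getD (left + 1) 0 - nums.getD left 0) else gain)
  else (left, gain)
termination_by right - left
decreasing_by omega

-- outer `while right < len(nums) - 1` loop of A
def pvOuterA (nums : List Int) (k : Int) (left right : Nat) (maxLen gain : Int) : Int :=
  if right < nums.length - 1 then
    let r := right + 1
    let gain1 := if nums.getD r 0 > nums.getD (r - 1) 0 then
        gain + (nums.getD r 0 - nums.getD (r - 1) 0) else gain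
    let res := pvInnerA nums k left r gain1
    pvOuterA nums k res.1 r (max maxLen ((r : Int) - (res.1 : Int) + 1)) res.2
  else maxLen
termination_by nums.length - 1 - right
decreasing_by omega

def longest_hike (nums : List Int) (k : Int) : Int :=
  if nums = [] then 0 else pvOuterA nums k 0 0 1 0

-- ===== PORT B =====
-- builds the prefix-gain table `pre` (the `for i in range(1, n)` append loop of B)
def pvBuildPre (nums : List Int) (i : Nat) (pre : List Int) : List Int :=
  if i < nums.length then
    pvBuildPre nums (i + 1)
      (pre ++ [pre.getLast?.getD 0 + max 0 (nums.getD i 0 - nums.getD (i - 1) 0)])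
  else pre
termination_by nums.length - i
decreasing_by omega

-- inner `while lo < hi` binary search of B for the leftmost l with pre[r] - pre[l] <= k
def pvBisectB (pre : List Int) (k pr : Int) (lo hi : Nat) : Nat :=
  if lo < hi then
    if pr - pre.getD ((lo + hi) / 2) 0 ≤ k then pvBisectB pre k pr lo ((lo + hi) / 2)
    else pvBisectB pre k pr ((lo + hi) / 2 + 1) hi
  else lo
termination_by hi - lo
decreasing_by all_goals omega

-- outer `for r in range(n)` loop of B
def pvLoopB (n : Nat) (pre : List Int) (k : Int) (r : Nat) (best : Int) : Int :=
  if r < n then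
    pvLoopB n pre k (r + 1)
      (if pvBisectB pre k (pre.getD r 0) 0 (r + 1) ≤ r then
        max best ((r : Int) - (pvBisectB pre k (pre.getD r 0) 0 (r + 1) : Int) + 1)
      else best)
  else best
termination_by n - r
decreasing_by omega

def longest_hike_alt (nums : List Int) (k : Int) : Int :=
  if nums.length = 0 then 0
  else pvLoopB nums.length (pvBuildPre nums 1 [0]) k 0 1

-- ===== PRECONDITION & SPEC =====
def Spec_longest_hike (nums : List Int) (k : Int) (out : Int) : Prop := out = longest_hike_alt nums k
instance (nums : List Int) (k : Int) (out : Int) : Decidable (Spec_longest_hike nums k out) := by unfold Spec_longest_hike; infer_instance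

-- ===== CLAIM (what is proved, stated in full; the proofs are below) =====
def Claim_equal_longest_hike : Prop := ∀ (nums : List Int) (k : Int), Dom_longest_hike nums k → Spec_longest_hike nums k (longest_hike nums k)

-- ===== LEMMAS AND PROOFS =====

-- accumulated uphill gain of nums[0..i]
def pvP (nums : List Int) : Nat → Int
  | 0 => 0
  | i + 1 => pvP nums i + max 0 (nums.getD (i + 1) 0 - nums.getD i 0)

lemma pvP_succ (nums : List Int) (i : Nat) :
    pvP nums (i + 1) = pvP nums i + max 0 (nums.getD (i + 1) 0 - nums.getD i 0) := rfl

lemma pvP_mono (nums : List Int) {i j : Nat} (h : i ≤ j) : pvP nums i ≤ pvP nums j := by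
  induction j with
  | zero =>
    have : i = 0 := by omega
    subst this; exact le_refl _
  | succ j ih =>
    rcases Nat.lt_or_ge i (j + 1) with hlt | hge
    · have := ih (by omega)
      rw [pvP_succ]; omega
    · have : i = j + 1 := by omega
      subst this; exact le_refl _

-- pvBuildPre appends exactly the prefix values pvP i, pvP (i+1), …
lemma pvBuildPre_spec (nums : List Int) : ∀ fuel i acc, nums.length - i ≤ fuel → 1 ≤ i →
    acc.getLast?.getD 0 = pvP nums (i - 1) →
    pvBuildPre nums i acc = acc ++ (List.range' i (nums.length - i)).map (pvP nums) := by
  intro fuel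
  induction fuel with
  | zero =>
    intro i acc hf _ _
    have h1 : ¬ i < nums.length := by omega
    have h2 : nums.length - i = 0 := by omega
    rw [pvBuildPre, if_neg h1, h2]; simp
  | succ fuel ih =>
    intro i acc hf hi hlast
    rw [pvBuildPre]
    by_cases h : i < nums.length
    · rw [if_pos h]
      obtain ⟨j, rfl⟩ : ∃ j, i = j + 1 := ⟨i - 1, by omega⟩
      have hstep : acc.getLast?.getD 0 + max 0 (nums.getD (j + 1) 0 - nums.getD (j + 1 - 1) 0)
          = pvP nums (j + 1) := by
        rw [hlast, pvP_succ]
        simp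
      have hlast' : (acc ++ [acc.getLast?.getD 0 +
          max 0 (nums.getD (j + 1) 0 - nums.getD (j + 1 - 1) 0)]).getLast?.getD 0
          = pvP nums (j + 1 + 1 - 1) := by
        simp only [List.getLast?_append, List.getLast?_singleton]
        simpa using hstep
      rw [ih (j + 1 + 1) _ (by omega) (by omega) hlast']
      rw [hstep]
      have hr : nums.length - (j + 1) = (nums.length - (j + 2)) + 1 := by omega
      rw [hr, List.range'_succ]
      simp
    · rw [if_neg h]
      have h2 : nums.length - i = 0 := by omega
      rw [h2]; simp

def pvGood (nums : List Int) (k : Int) (r j : Nat) : Prop := pvP nums r - pvP nums j ≤ k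

lemma pvGood_mono_r (nums : List Int) (k : Int) {r r' j : Nat} (h : r ≤ r')
    (hg : pvGood nums k r' j) : pvGood nums k r j := by
  have := pvP_mono nums h
  unfold pvGood at *; omega

-- characterization of A's inner while loop
lemma pvInnerA_spec (nums : List Int) (k : Int) : ∀ fuel left right gain,
    right - left ≤ fuel → left ≤ right → gain = pvP nums right - pvP nums left →
    left ≤ (pvInnerA nums k left right gain).1 ∧ (pvInnerA nums k left right gain).1 ≤ right ∧
    (pvInnerA nums k left right gain).2 =
      pvP nums right - pvP nums (pvInnerA nums k left right gain).1 ∧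
    ((pvInnerA nums k left right gain).2 ≤ k ∨ (pvInnerA nums k left right gain).1 = right) ∧
    ∀ j, left ≤ j → j < (pvInnerA nums k left right gain).1 → ¬ pvGood nums k right j := by
  intro fuel
  induction fuel with
  | zero =>
    intro left right gain hf hlr hg
    have : left = right := by omega
    subst this
    rw [pvInnerA, if_neg (by omega)]
    exact ⟨le_refl _, le_refl _, hg, Or.inr rfl, by omega⟩
  | succ fuel ih =>
    intro left right gain hf hlr hg
    rw [pvInnerA]
    by_cases h : gain > k ∧ left < right
    · rw [if_pos h]
      have hg' : (if nums.getD (left + 1) 0 > nums.getD left 0 then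
          gain - (nums.getD (left + 1) 0 - nums.getD left 0) else gain)
          = pvP nums right - pvP nums (left + 1) := by
        rw [pvP_succ]
        split_ifs with hc <;> omega
      have hrec := ih (left + 1) right _ (by omega) (by omega) hg'
      refine ⟨by omega, hrec.2.1, hrec.2.2.1, hrec.2.2.2.1, ?_⟩
      intro j hj1 hj2
      rcases Nat.lt_or_ge j (left + 1) with hj | hj
      · have : j = left := by omega
        subst this
        unfold pvGood; omega
      · exact hrec.2.2.2.2 j hj hj2
    · rw [if_neg h]
      refine ⟨le_refl _, hlr, hg, ?_, by omega⟩
      by_cases hgk : gain ≤ k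
      · exact Or.inl hgk
      · exact Or.inr (by omega)

-- characterization of B's binary search: least good l, or hi if none in [lo, hi)
lemma pvBisectB_spec (nums : List Int) (k : Int) (pre : List Int) (r : Nat)
    (hpre : ∀ j, j ≤ r → pre.getD j 0 = pvP nums j) :
    ∀ fuel lo hi, hi - lo ≤ fuel → lo ≤ hi → hi ≤ r + 1 →
    (∀ j, j < lo → ¬ pvGood nums k r j) → (∀ j, hi ≤ j → j ≤ r → pvGood nums k r j) →
    lo ≤ pvBisectB pre k (pvP nums r) lo hi ∧ pvBisectB pre k (pvP nums r) lo hi ≤ hi ∧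
    (∀ j, j < pvBisectB pre k (pvP nums r) lo hi → ¬ pvGood nums k r j) ∧
    (∀ j, pvBisectB pre k (pvP nums r) lo hi ≤ j → j ≤ r → pvGood nums k r j) := by
  intro fuel
  induction fuel with
  | zero =>
    intro lo hi hf hlh hhr hbad hgood
    have : lo = hi := by omega
    subst this
    rw [pvBisectB, if_neg (by omega)]
    exact ⟨le_refl _, le_refl _, hbad, hgood⟩
  | succ fuel ih =>
    intro lo hi hf hlh hhr hbad hgood
    rw [pvBisectB]
    by_cases h : lo < hi
    · rw [if_pos h, hpre ((lo + hi) / 2) (by omega)]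
      by_cases hgd : pvP nums r - pvP nums ((lo + hi) / 2) ≤ k
      · rw [if_pos hgd]
        have hrec := ih lo ((lo + hi) / 2) (by omega) (by omega) (by omega) hbad
          (by intro j hj1 hj2
              have := pvP_mono nums hj1
              unfold pvGood at *; omega)
        exact ⟨hrec.1, by omega, hrec.2.2.1, hrec.2.2.2⟩
      · rw [if_neg hgd]
        have hrec := ih ((lo + hi) / 2 + 1) hi (by omega) (by omega) hhr
          (by intro j hj
              rcases Nat.lt_or_ge j lo with hj2 | hj2
              · exact hbad j hj2
              · intro hg
                have := pvP_mono nums (show j ≤ (lo + hi) / 2 by omega)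
                exact hgd (by unfold pvGood at hg; omega)) hgood
        exact ⟨by omega, hrec.2.1, hrec.2.2.1, hrec.2.2.2⟩
    · rw [if_neg h]
      have hEq : lo = hi := by omega
      subst hEq
      exact ⟨le_refl _, le_refl _, hbad, hgood⟩

-- joint induction: after processing index `right`, A's remaining outer loop equals B's
lemma pvMain (nums : List Int) (k : Int) (pre : List Int)
    (hpre : ∀ j, j < nums.length → pre.getD j 0 = pvP nums j) :
    ∀ fuel right left best gain,
    nums.length - right ≤ fuel → left ≤ right → right < nums.length →
    gain = pvP nums right - pvP nums left →
    (∀ j, j < left → ¬ pvGood nums k right j) → 1 ≤ best →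
    pvOuterA nums k left right best gain = pvLoopB nums.length pre k (right + 1) best := by
  intro fuel
  induction fuel with
  | zero => intro right _ _ _ hf _ hr _ _ _; omega
  | succ fuel ih =>
    intro right left best gain hf hlr hr hg hbad hb
    rw [pvOuterA, pvLoopB]
    by_cases h : right < nums.length - 1
    · rw [if_pos h, if_pos (by omega)]
      simp only []
      have hgain1 : (if nums.getD (right + 1) 0 > nums.getD (right + 1 - 1) 0 then
          gain + (nums.getD (right + 1) 0 - nums.getD (right + 1 - 1) 0) else gain)
          = pvP nums (right + 1) - pvP nums left := by
        rw [pvP_succ]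
        simp only [Nat.add_sub_cancel]
        split_ifs with hc <;> omega
      have hinner := pvInnerA_spec nums k (right + 1 - left) left (right + 1) _
        (by omega) (by omega) hgain1
      set res := pvInnerA nums k left (right + 1)
        (if nums.getD (right + 1) 0 > nums.getD (right + 1 - 1) 0 then
          gain + (nums.getD (right + 1) 0 - nums.getD (right + 1 - 1) 0) else gain) with hres
      obtain ⟨h1, h2, h3, h4, h5⟩ := hinner
      have hbad' : ∀ j, j < res.1 → ¬ pvGood nums k (right + 1) j := by
        intro j hj
        rcases Nat.lt_or_ge j left with hj2 | hj2
        · intro hgd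
          exact hbad j hj2 (pvGood_mono_r nums k (by omega) hgd)
        · exact h5 j hj2 hj
      have hbis := pvBisectB_spec nums k pre (right + 1)
        (fun j hj => hpre j (by omega)) (right + 2) 0 (right + 2) (by omega) (by omega)
        (by omega) (by omega) (by intro j hj1 hj2; omega)
      rw [hpre (right + 1) (by omega)]
      set L := pvBisectB pre k (pvP nums (right + 1)) 0 (right + 1 + 1) with hL
      obtain ⟨hb1, hb2, hb3, hb4⟩ := hbis
      by_cases hle : L ≤ right + 1
      · rw [if_pos hle]
        have heq : res.1 = L := by
          rcases Nat.lt_or_ge res.1 L with hc | hc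
          · exfalso
            have hgk : res.2 ≤ k := by
              rcases h4 with h4 | h4
              · exact h4
              · omega
            exact hb3 res.1 hc (by unfold pvGood; omega)
          · rcases Nat.lt_or_ge L res.1 with hc2 | hc2
            · exact absurd (hb4 L (le_refl _) hle) (hbad' L hc2)
            · omega
        rw [heq] at h3 hbad' ⊢
        exact ih (right + 1) L _ res.2 (by omega) (by omega) (by omega) h3 hbad'
          (hb.trans (le_max_left _ _))
      · rw [if_neg hle]
        have hall : ∀ j, j ≤ right + 1 → ¬ pvGood nums k (right + 1) j := by
          intro j hj
          exact hb3 j (by omega)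
        have hr1 : res.1 = right + 1 := by
          rcases h4 with h4 | h4
          · exfalso; exact hall res.1 (by omega) (by unfold pvGood; omega)
          · exact h4
        rw [hr1] at h3 ⊢
        have h11 : ((right + 1 : Nat) : Int) - ((right + 1 : Nat) : Int) + 1 = 1 := by ring
        rw [h11, max_eq_left hb]
        exact ih (right + 1) (right + 1) best res.2 (by omega) (by omega) (by omega)
          h3 (by intro j hj; exact hall j (by omega)) hb
    · rw [if_neg h, if_neg (by omega)]

lemma pre_full (nums : List Int) (h : nums ≠ []) :
    ∀ j, j < nums.length → (pvBuildPre nums 1 [0]).getD j 0 = pvP nums j := by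
  have hlen : 1 ≤ nums.length := by
    cases nums with
    | nil => exact absurd rfl h
    | cons a l => simp
  have hb := pvBuildPre_spec nums (nums.length - 1) 1 [0] (by omega) (le_refl _)
    (by simp [pvP])
  rw [hb]
  intro j hj
  rcases Nat.eq_zero_or_pos j with hj0 | hj0
  · subst hj0; simp [pvP]
  · rw [List.getD_eq_getElem?_getD]
    rw [List.getElem?_append_right (by simp; omega)]
    simp only [List.length_singleton]
    rw [List.getElem?_map, List.getElem?_range' (by omega)]
    simp
    congr 1
    omega

-- ===== VERDICT (by name: the statement is the Claim_ definition above) =====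
theorem longest_hike_spec : Claim_equal_longest_hike := by
  intro nums k _
  unfold Spec_longest_hike longest_hike longest_hike_alt
  by_cases h : nums = []
  · simp [h]
  · rw [if_neg h, if_neg (by simpa [List.length_eq_zero_iff] using h)]
    have hlen : 1 ≤ nums.length := by
      cases nums with
      | nil => exact absurd rfl h
      | cons a l => simp
    have hpre := pre_full nums h
    rw [pvLoopB, if_pos (by omega)]
    have hbv : pvBisectB (pvBuildPre nums 1 [0]) k ((pvBuildPre nums 1 [0]).getD 0 0) 0 (0 + 1)
        = if (pvBuildPre nums 1 [0]).getD 0 0 - (pvBuildPre nums 1 [0]).getD ((0 + 1) / 2) 0 ≤ k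
          then 0 else 1 := by
      rw [pvBisectB, if_pos (by omega)]
      split_ifs with hc
      · rw [pvBisectB, if_neg (by omega)]
      · rw [pvBisectB, if_neg (by omega)]
    rw [hbv]
    have hstep1 : (if (if (pvBuildPre nums 1 [0]).getD 0 0 -
          (pvBuildPre nums 1 [0]).getD ((0 + 1) / 2) 0 ≤ k then 0 else 1) ≤ 0 then
        max 1 (((0 : Nat) : Int) - (((if (pvBuildPre nums 1 [0]).getD 0 0 -
          (pvBuildPre nums 1 [0]).getD ((0 + 1) / 2) 0 ≤ k then 0 else 1) : Nat) : Int) + 1)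
        else (1 : Int)) = 1 := by
      split_ifs with hc hc2 <;> simp_all
    rw [hstep1]
    have hmain := pvMain nums k (pvBuildPre nums 1 [0]) hpre nums.length 0 0 1 0
      (le_refl _) (le_refl _) (by omega) (by simp [pvP]) (by omega) (by omega)
    exact hmain
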